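-- pv_equiv track=rewrite | github.com/BackofenLab/B1_04_align-affine-gap | gotoh_implementation/gotoh.py | init_d_matrix_correct
-- ===== SOURCE A (Python) =====
-- def zero_init_correct(seq1, seq2):
--     return [[0] * (len(seq2) + 1) for _ in range(len(seq1) + 1)]
--
-- def init_d_matrix_correct(seq1, seq2, scoring):
--     match, mismatch, gap_intro, gap_extend = (
--         scoring["match"],
--         scoring["mismatch"],
--         scoring["gap_introduction"],
--         scoring["gap_extension"]
--     )
--     d_matrix = zero_init_correct(seq1, seq2)
--     first_row = [0] + [gap_intro + i * gap_extend for i in range(1, len(seq2) + 1)]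
--     d_matrix[0] = first_row
--     for index, row in enumerate(d_matrix):
--         if index > 0:
--             row[0] = gap_intro + index * gap_extend
--     return d_matrix
-- ===== SOURCE B (Python) =====
-- def init_d_matrix_correct(seq1, seq2, scoring):
--     match, mismatch, gap_intro, gap_extend = (
--         scoring["match"],
--         scoring["mismatch"],
--         scoring["gap_introduction"],
--         scoring["gap_extension"]
--     )
--
--     def cell(i, j):
--         # Exactly one of i, j is zero on the gap boundary; there i + j is the
--         # gap length, everywhere else the value is 0.
--         if (i == 0) != (j == 0):
--             return gap_intro + (i + j) * gap_extend
--         return 0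
--
--     return [[cell(i, j) for j in range(len(seq2) + 1)]
--             for i in range(len(seq1) + 1)]
-- ===== Notes on version B (the rewrite author's own statement) =====
-- stated objective: alternative
-- what changed: B evaluates one uniform closed-form cell function cell(i,j) (nonzero exactly when one of i,j is 0, value gap_intro+(i+j)*gap_extend) over all indices, instead of A's allocate-a-zero-matrix, overwrite row 0, then patch column 0 in an enumerate loop.
import Mathlib
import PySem

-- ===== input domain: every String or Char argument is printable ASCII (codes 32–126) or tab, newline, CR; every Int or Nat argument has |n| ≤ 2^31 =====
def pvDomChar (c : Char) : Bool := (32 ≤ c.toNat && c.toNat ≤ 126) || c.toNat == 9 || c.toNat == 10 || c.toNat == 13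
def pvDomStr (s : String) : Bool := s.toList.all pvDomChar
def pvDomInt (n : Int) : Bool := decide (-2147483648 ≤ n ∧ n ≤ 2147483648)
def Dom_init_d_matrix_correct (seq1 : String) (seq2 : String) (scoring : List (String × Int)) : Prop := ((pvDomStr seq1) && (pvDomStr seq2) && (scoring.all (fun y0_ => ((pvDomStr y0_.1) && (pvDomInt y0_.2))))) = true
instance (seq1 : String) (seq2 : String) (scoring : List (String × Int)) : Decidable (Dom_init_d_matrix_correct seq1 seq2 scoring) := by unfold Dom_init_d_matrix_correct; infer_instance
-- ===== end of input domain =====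

-- ===== PORT A =====
-- B computes every cell from one closed-form boundary formula instead of A's zero-init then two patch passes.
def zero_init_correct (seq1 : String) (seq2 : String) : List (List Int) :=
  (PySem.List.pyRange 0 ((seq1.toList.length : Int) + 1) 1).map
    (fun _ => List.replicate (seq2.toList.length + 1) (0 : Int))

def init_d_matrix_correct (seq1 : String) (seq2 : String) (scoring : List (String × Int)) : List (List Int) :=
  match (PySem.Dict.ofList scoring).get? "match", (PySem.Dict.ofList scoring).get? "mismatch",
        (PySem.Dict.ofList scoring).get? "gap_introduction", (PySem.Dict.ofList scoring).get? "gap_extension" with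
  | some _match, some _mismatch, some gap_intro, some gap_extend =>
    let d_matrix := zero_init_correct seq1 seq2
    let first_row := (0 : Int) ::
      (PySem.List.pyRange 1 ((seq2.toList.length : Int) + 1) 1).map (fun i => gap_intro + i * gap_extend)
    let d_matrix := d_matrix.set 0 first_row
    (PySem.List.enumerate d_matrix 0).map
      (fun p => if p.1 > 0 then p.2.set 0 (gap_intro + p.1 * gap_extend) else p.2)
  | _, _, _, _ => []  -- KeyError in Python: excluded by Pre_

-- ===== PORT B =====
def init_d_matrix_correct_alt (seq1 : String) (seq2 : String) (scoring : List (String × Int)) : List (List Int) :=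
  let d := PySem.Dict.ofList scoring
  if (d.get? "match").isSome ∧ (d.get? "mismatch").isSome ∧
     (d.get? "gap_introduction").isSome ∧ (d.get? "gap_extension").isSome then
    let gap_intro := (d.get? "gap_introduction").getD 0
    let gap_extend := (d.get? "gap_extension").getD 0
    let cell : Int → Int → Int := fun i j =>
      if (decide (i = 0)) != (decide (j = 0)) then gap_intro + (i + j) * gap_extend else 0
    (PySem.List.pyRange 0 ((seq1.toList.length : Int) + 1) 1).map (fun i =>
      (PySem.List.pyRange 0 ((seq2.toList.length : Int) + 1) 1).map (fun j => cell i j))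
  else []  -- KeyError in Python: excluded by Pre_

-- ===== PRECONDITION & SPEC =====
-- Pre_ excludes exactly the scoring dicts missing one of the four keys, on which Python A raises KeyError.
def Pre_init_d_matrix_correct (seq1 : String) (seq2 : String) (scoring : List (String × Int)) : Prop :=
  ((PySem.Dict.ofList scoring).get? "match").isSome ∧ ((PySem.Dict.ofList scoring).get? "mismatch").isSome ∧
  ((PySem.Dict.ofList scoring).get? "gap_introduction").isSome ∧ ((PySem.Dict.ofList scoring).get? "gap_extension").isSome
instance (seq1 : String) (seq2 : String) (scoring : List (String × Int)) : Decidable (Pre_init_d_matrix_correct seq1 seq2 scoring) := by unfold Pre_init_d_matrix_correct; infer_instance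

def pvWitness_init_d_matrix_correct : String × String × (List (String × Int)) :=
  ("AC", "AGT", [("match", 1), ("mismatch", -1), ("gap_introduction", -4), ("gap_extension", -2)])

def Spec_init_d_matrix_correct (seq1 : String) (seq2 : String) (scoring : List (String × Int)) (out : List (List Int)) : Prop := out = init_d_matrix_correct_alt seq1 seq2 scoring
instance (seq1 : String) (seq2 : String) (scoring : List (String × Int)) (out : List (List Int)) : Decidable (Spec_init_d_matrix_correct seq1 seq2 scoring out) := by unfold Spec_init_d_matrix_correct; infer_instance

-- ===== CLAIM (what is proved, stated in full; the proofs are below) =====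
def Claim_equal_init_d_matrix_correct : Prop := ∀ (seq1 : String) (seq2 : String) (scoring : List (String × Int)), Dom_init_d_matrix_correct seq1 seq2 scoring → Pre_init_d_matrix_correct seq1 seq2 scoring → Spec_init_d_matrix_correct seq1 seq2 scoring (init_d_matrix_correct seq1 seq2 scoring)

-- ===== LEMMAS AND PROOFS =====

-- A's patched tail equals the boundary-formula rows, for any tail length n1.
lemma patched_tail_eq (gi ge : Int) (n1 n2 : Nat) : ∀ (s : Int),
    (PySem.List.enumerate (List.replicate n1 (List.replicate (n2 + 1) (0 : Int))) s).map
      (fun p => if p.1 > 0 then p.2.set 0 (gi + p.1 * ge) else p.2)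
    = (PySem.List.pyRange s (s + n1) 1).map
        (fun i => if i > 0 then (gi + i * ge) :: List.replicate n2 0 else List.replicate (n2 + 1) 0) := by
  induction n1 with
  | zero => intro s; simp [PySem.List.enumerate_nil, PySem.List.pyRange_one_eq_nil]
  | succ k ih =>
    intro s
    rw [List.replicate_succ, PySem.List.enumerate_cons,
        PySem.List.pyRange_one_cons (by omega : s < s + (k + 1 : Nat))]
    simp only [List.map_cons]
    refine congrArg₂ List.cons ?_ ?_
    · split <;> simp [List.replicate_succ]
    · rw [show s + ((k + 1 : Nat) : Int) = (s + 1) + (k : Int) by push_cast; ring, ih (s + 1)]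

-- B's row built by the cell formula, for i > 0: head from the formula, zeros after.
lemma alt_row_pos (gi ge : Int) (m : Nat) (i : Int) (hi : 0 < i) :
    (PySem.List.pyRange 0 ((m : Int) + 1) 1).map (fun j =>
      if (decide (i = 0)) != (decide (j = 0)) then gi + (i + j) * ge else 0)
    = (gi + i * ge) :: List.replicate m 0 := by
  rw [PySem.List.pyRange_one_cons (by omega : (0 : Int) < (m : Int) + 1)]
  simp only [List.map_cons]
  refine congrArg₂ List.cons ?_ ?_
  · simp [show i ≠ 0 by omega]
  · rw [List.eq_replicate_iff]
    refine ⟨by simp [PySem.List.length_pyRange_one], fun b hb => ?_⟩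
    simp only [List.mem_map] at hb
    obtain ⟨j, hj, hb⟩ := hb
    rw [PySem.List.mem_pyRange_one] at hj
    simp [show i ≠ 0 by omega, show j ≠ 0 by omega] at hb
    omega

theorem init_d_matrix_correct_spec_aux (seq1 seq2 : String) (scoring : List (String × Int))
    (hpre : Pre_init_d_matrix_correct seq1 seq2 scoring) :
    init_d_matrix_correct seq1 seq2 scoring = init_d_matrix_correct_alt seq1 seq2 scoring := by
  obtain ⟨h1, h2, h3, h4⟩ := hpre
  obtain ⟨m, hm⟩ := Option.isSome_iff_exists.mp h1
  obtain ⟨mm, hmm⟩ := Option.isSome_iff_exists.mp h2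
  obtain ⟨gi, hgi⟩ := Option.isSome_iff_exists.mp h3
  obtain ⟨ge, hge⟩ := Option.isSome_iff_exists.mp h4
  unfold init_d_matrix_correct init_d_matrix_correct_alt zero_init_correct
  simp only [hm, hmm, hgi, hge, Option.isSome_some, and_self, if_true, Option.getD_some]
  -- zero-init matrix: (n1+1) rows of zeros
  have hz : (PySem.List.pyRange 0 ((seq1.toList.length : Int) + 1) 1).map
      (fun _ => List.replicate (seq2.toList.length + 1) (0 : Int))
      = List.replicate (seq1.toList.length + 1) (List.replicate (seq2.toList.length + 1) (0 : Int)) := by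
    rw [List.eq_replicate_iff]
    constructor
    · simp [PySem.List.length_pyRange_one]
    · intro b hb
      simp only [List.mem_map] at hb
      obtain ⟨_, _, hb⟩ := hb
      exact hb.symm
  rw [hz, List.replicate_succ, List.set_cons_zero, PySem.List.enumerate_cons,
      PySem.List.pyRange_one_cons (by omega : (0 : Int) < (seq1.toList.length : Int) + 1)]
  simp only [List.map_cons, gt_iff_lt, lt_irrefl, if_false]
  refine congrArg₂ List.cons ?_ ?_
  · -- first row
    rw [PySem.List.pyRange_one_cons (by omega : (0 : Int) < (seq2.toList.length : Int) + 1)]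
    simp only [List.map_cons]
    refine congrArg₂ List.cons (by simp) ?_
    refine List.map_congr_left (fun j hj => ?_)
    rw [PySem.List.mem_pyRange_one] at hj
    simp [show j ≠ 0 by omega]
  · -- remaining rows
    simp only [zero_add]
    rw [patched_tail_eq gi ge seq1.toList.length seq2.toList.length 1,
        show (1 : Int) + (seq1.toList.length : Int) = (seq1.toList.length : Int) + 1 by ring]
    refine List.map_congr_left (fun i hi => ?_)
    rw [PySem.List.mem_pyRange_one] at hi
    rw [alt_row_pos gi ge seq2.toList.length i (by omega)]
    simp [show (0:Int) < i by omega]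

-- ===== VERDICT (by name: the statement is the Claim_ definition above) =====
theorem init_d_matrix_correct_spec : Claim_equal_init_d_matrix_correct := by
  intro seq1 seq2 scoring _ hpre
  exact init_d_matrix_correct_spec_aux seq1 seq2 scoring hpre
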